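-- pv_equiv track=rewrite | github.com/aran-tia/python-start | day22_problem3.py | even_info
-- ===== SOURCE A (Python) =====
-- def even_info(numbers):
--     count = 0
--     total = 0
--
--     for n in numbers:
--         if n % 2 == 0:
--             count += 1
--             total += n
--     return count, total
-- ===== SOURCE B (Python) =====
-- def even_info(numbers):
--     # Branchless: w = 1 - n % 2 is 1 for even n, 0 for odd n (Python's % with
--     # positive divisor is always 0 or 1), so no conditional is ever taken.
--     weights = [1 - n % 2 for n in numbers]
--     return sum(weights), sum(w * n for w, n in zip(weights, numbers))
-- ===== Notes on version B (the rewrite author's own statement) =====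
-- stated objective: alternative
-- what changed: Replaces A's conditional accumulator loop with branchless indicator arithmetic: a parity-weight vector w = 1 - n % 2 is built once, and the answers are the plain sums sum(w) and sum(w*n) with no conditional anywhere.
import Mathlib
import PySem

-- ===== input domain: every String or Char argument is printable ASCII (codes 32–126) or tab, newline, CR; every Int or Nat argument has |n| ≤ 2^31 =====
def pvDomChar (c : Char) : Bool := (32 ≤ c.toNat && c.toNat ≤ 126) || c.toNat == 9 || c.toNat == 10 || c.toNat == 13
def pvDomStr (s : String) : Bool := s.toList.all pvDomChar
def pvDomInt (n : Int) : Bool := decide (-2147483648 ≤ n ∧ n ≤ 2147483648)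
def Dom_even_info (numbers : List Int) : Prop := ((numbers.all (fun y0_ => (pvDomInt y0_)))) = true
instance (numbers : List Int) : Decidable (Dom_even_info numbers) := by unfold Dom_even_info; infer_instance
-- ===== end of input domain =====

-- B replaces A's conditional accumulator loop with branchless indicator arithmetic (weights 1 - n % 2, then two plain sums); objective: alternative.


-- ===== PORT A =====
-- A: one fused pass keeping (count, total) accumulators, with a parity conditional.
def even_info (numbers : List Int) : Int × Int :=
  numbers.foldl (fun (st : Int × Int) n =>
    if PySem.Int.mod n 2 = 0 then (st.1 + 1, st.2 + n) else st) (0, 0)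

-- ===== PORT B =====
-- B: build the parity-weight vector w = 1 - n % 2 once, return (sum w, sum w*n); no conditional.
def even_info_alt (numbers : List Int) : Int × Int :=
  let weights := numbers.map (fun n => 1 - PySem.Int.mod n 2)
  (weights.sum, ((weights.zip numbers).map (fun p => p.1 * p.2)).sum)

-- ===== PRECONDITION & SPEC =====
def Spec_even_info (numbers : List Int) (out : Int × Int) : Prop := out = even_info_alt numbers
instance (numbers : List Int) (out : Int × Int) : Decidable (Spec_even_info numbers out) := by unfold Spec_even_info; infer_instance

-- ===== CLAIM (what is proved, stated in full; the proofs are below) =====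
def Claim_equal_even_info : Prop := ∀ (numbers : List Int), Dom_even_info numbers → Spec_even_info numbers (even_info numbers)

-- ===== LEMMAS AND PROOFS =====
theorem pymod_two_cases (n : Int) : PySem.Int.mod n 2 = 0 ∨ PySem.Int.mod n 2 = 1 := by
  simp only [PySem.Int.mod]
  rw [Int.fmod_eq_emod]
  simp
  omega

theorem even_info_fold (numbers : List Int) (c t : Int) :
    numbers.foldl (fun (st : Int × Int) n =>
      if PySem.Int.mod n 2 = 0 then (st.1 + 1, st.2 + n) else st) (c, t)
    = (c + (numbers.map (fun n => 1 - PySem.Int.mod n 2)).sum,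
       t + (((numbers.map (fun n => 1 - PySem.Int.mod n 2)).zip numbers).map
              (fun p => p.1 * p.2)).sum) := by
  induction numbers generalizing c t with
  | nil => simp
  | cons x xs ih =>
    simp only [List.foldl_cons, List.map_cons, List.zip_cons_cons, List.sum_cons]
    rcases pymod_two_cases x with h | h
    · rw [if_pos h, ih, h, Prod.mk.injEq]; constructor <;> ring
    · rw [if_neg (by rw [h]; decide), ih, h, Prod.mk.injEq]; constructor <;> ring

theorem even_info_eq (numbers : List Int) : even_info numbers = even_info_alt numbers := by
  unfold even_info even_info_alt
  rw [even_info_fold]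
  simp

-- ===== VERDICT (by name: the statement is the Claim_ definition above) =====
theorem even_info_spec : Claim_equal_even_info := by
  intro numbers _
  exact even_info_eq numbers
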